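-- pv_equiv track=rewrite | github.com/Hemasatyaveni/DSA_PRACTICE | nonfibonacci.py | nonfibonacci
-- ===== SOURCE A (Python) =====
-- def nonfibonacci(n):
--     fib = set()
--     a,b = 0,1
--     while a<=n:
--         fib.add(a)
--         a,b = b,a+b
--     nonfib = []
--     for i in range(1,n+1):
--         if i not in fib:
--             nonfib.append(i)
--     return nonfib
-- ===== SOURCE B (Python) =====
-- def nonfibonacci(n):
--     # Walk consecutive Fibonacci pairs and emit the gaps between them directly.
--     res = []
--     a, b = 1, 2
--     while b <= n:
--         res.extend(range(a + 1, b))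
--         a, b = b, a + b
--     res.extend(range(a + 1, n + 1))
--     return res
-- ===== Notes on version B (the rewrite author's own statement) =====
-- stated objective: faster
-- what changed: Instead of building a Fibonacci membership set and testing every integer 1..n against it, B walks consecutive Fibonacci pairs (a,b) and emits the gap ranges a+1..b-1 between them directly, finishing with the tail range up to n.
import Mathlib
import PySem

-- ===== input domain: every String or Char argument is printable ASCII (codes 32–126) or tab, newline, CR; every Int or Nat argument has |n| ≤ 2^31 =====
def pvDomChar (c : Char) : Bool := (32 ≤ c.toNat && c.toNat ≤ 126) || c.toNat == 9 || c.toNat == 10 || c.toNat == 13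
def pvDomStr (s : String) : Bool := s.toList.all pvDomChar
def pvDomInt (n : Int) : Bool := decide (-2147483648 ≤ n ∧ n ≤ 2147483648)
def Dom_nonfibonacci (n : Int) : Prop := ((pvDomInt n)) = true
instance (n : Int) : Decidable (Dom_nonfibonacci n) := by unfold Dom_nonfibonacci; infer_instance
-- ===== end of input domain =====

-- B emits the gaps between consecutive Fibonacci numbers directly instead of building a
-- membership set and scanning 1..n; same return value, different algorithm.

-- ===== PORT A =====
-- while a<=n: fib.add(a); a,b = b,a+b   (invariant 0 ≤ a ≤ b, 1 ≤ b carried for termination)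
def fibLoopA (n a b : Int) (s : PySem.Set Int) (h : 0 ≤ a ∧ a ≤ b ∧ 1 ≤ b) : PySem.Set Int :=
  if a ≤ n then
    fibLoopA n b (a + b) (PySem.Set.add s a) ⟨by omega, by omega, by omega⟩
  else s
termination_by (2 * (n + 1 - a)).toNat + (if b ≤ a then 1 else 0)
decreasing_by split_ifs <;> omega

def nonfibonacci (n : Int) : List Int :=
  let fib := fibLoopA n 0 1 PySem.Set.empty ⟨by omega, by omega, by omega⟩
  (PySem.List.pyRange 1 (n + 1) 1).foldl
    (fun acc i => if !(PySem.Set.contains fib i) then acc ++ [i] else acc) []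

-- ===== PORT B =====
-- while b<=n: res.extend(range(a+1,b)); a,b = b,a+b  then res.extend(range(a+1,n+1))
def gapLoopB (n a b : Int) (res : List Int) (h : 1 ≤ a ∧ a < b) : List Int :=
  if b ≤ n then
    gapLoopB n b (a + b) (res ++ PySem.List.pyRange (a + 1) b 1) ⟨by omega, by omega⟩
  else res ++ PySem.List.pyRange (a + 1) (n + 1) 1
termination_by (n + 1 - b).toNat
decreasing_by omega

def nonfibonacci_alt (n : Int) : List Int := gapLoopB n 1 2 [] ⟨by omega, by omega⟩

-- ===== PRECONDITION & SPEC =====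
def Spec_nonfibonacci (n : Int) (out : List Int) : Prop := out = nonfibonacci_alt n
instance (n : Int) (out : List Int) : Decidable (Spec_nonfibonacci n out) := by unfold Spec_nonfibonacci; infer_instance

-- ===== CLAIM (what is proved, stated in full; the proofs are below) =====
def Claim_equal_nonfibonacci : Prop := ∀ (n : Int), Dom_nonfibonacci n → Spec_nonfibonacci n (nonfibonacci n)

-- ===== LEMMAS AND PROOFS =====

-- the list of Fibonacci numbers ≤ n visited from state (a, b)
def fibTail (n a b : Int) (h : 0 ≤ a ∧ a ≤ b ∧ 1 ≤ b) : List Int :=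
  if a ≤ n then a :: fibTail n b (a + b) ⟨by omega, by omega, by omega⟩ else []
termination_by (2 * (n + 1 - a)).toNat + (if b ≤ a then 1 else 0)
decreasing_by split_ifs <;> omega

theorem mem_fibLoopA (n a b : Int) (s : PySem.Set Int) (h : 0 ≤ a ∧ a ≤ b ∧ 1 ≤ b) (i : Int) :
    i ∈ fibLoopA n a b s h ↔ i ∈ s ∨ i ∈ fibTail n a b h := by
  induction a, b, s, h using fibLoopA.induct (n := n) with
  | case1 a b s h hle ih =>
    rw [fibLoopA, fibTail]
    simp only [hle, if_pos, ih, PySem.Set.mem_add, List.mem_cons]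
    tauto
  | case2 a b s h hle =>
    rw [fibLoopA, fibTail]
    simp [hle]

theorem mem_fibTail_ge (n a b : Int) (h : 0 ≤ a ∧ a ≤ b ∧ 1 ≤ b) (i : Int)
    (hi : i ∈ fibTail n a b h) : a ≤ i := by
  induction a, b, h using fibTail.induct (n := n) with
  | case1 a b h hle ih =>
    rw [fibTail] at hi
    simp only [hle, if_pos, List.mem_cons] at hi
    rcases hi with rfl | hi
    · omega
    · have := ih hi; omega
  | case2 a b h hle =>
    rw [fibTail] at hi
    simp [hle] at hi

theorem gapLoopB_eq_filter (n : Int) (a b : Int) (res : List Int) (h : 1 ≤ a ∧ a < b) :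
    ∀ (h2 : 0 ≤ b ∧ b ≤ a + b ∧ 1 ≤ a + b),
    gapLoopB n a b res h =
      res ++ (PySem.List.pyRange (a + 1) (n + 1) 1).filter
        (fun i => !(decide (i ∈ fibTail n b (a + b) h2))) := by
  induction a, b, res, h using gapLoopB.induct (n := n) with
  | case1 a b res h hb ih =>
    intro h2
    rw [gapLoopB]
    simp only [if_pos hb]
    rw [ih ⟨by omega, by omega, by omega⟩]
    conv_rhs => rw [fibTail]
    simp only [if_pos hb]
    have hsplit : PySem.List.pyRange (a + 1) (n + 1) 1
        = PySem.List.pyRange (a + 1) b 1 ++ (b :: PySem.List.pyRange (b + 1) (n + 1) 1) := by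
      rw [PySem.List.pyRange_one_append (a + 1) b (n + 1) (by omega) (by omega),
          PySem.List.pyRange_one_cons (a := b) (b := n + 1) (by omega)]
    rw [hsplit, List.filter_append, List.filter_cons]
    have h1 : (PySem.List.pyRange (a + 1) b 1).filter
        (fun i => !(decide (i ∈ (b :: fibTail n (a + b) (b + (a + b)) ⟨by omega, by omega, by omega⟩ : List Int))))
        = PySem.List.pyRange (a + 1) b 1 := by
      apply List.filter_eq_self.mpr
      intro i hi
      rw [PySem.List.mem_pyRange_one] at hi
      simp only [List.mem_cons, Bool.not_eq_eq_eq_not, Bool.not_true, decide_eq_false_iff_not,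
        not_or]
      constructor
      · omega
      · intro hmem
        have := mem_fibTail_ge n (a + b) (b + (a + b)) _ i hmem
        omega
    have hb' : (!(decide (b ∈ (b :: fibTail n (a + b) (b + (a + b)) ⟨by omega, by omega, by omega⟩ : List Int)))) = false := by
      simp
    have h3 : (PySem.List.pyRange (b + 1) (n + 1) 1).filter
        (fun i => !(decide (i ∈ (b :: fibTail n (a + b) (b + (a + b)) ⟨by omega, by omega, by omega⟩ : List Int))))
        = (PySem.List.pyRange (b + 1) (n + 1) 1).filter
          (fun i => !(decide (i ∈ fibTail n (a + b) (b + (a + b)) ⟨by omega, by omega, by omega⟩))) := by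
      apply List.filter_congr
      intro i hi
      rw [PySem.List.mem_pyRange_one] at hi
      congr 1
      apply decide_eq_decide.mpr
      simp only [List.mem_cons]
      constructor
      · rintro (rfl | hmem)
        · omega
        · exact hmem
      · exact fun hmem => Or.inr hmem
    rw [hb', h1, h3]
    simp
  | case2 a b res h hb =>
    intro h2
    rw [gapLoopB]
    simp only [if_neg hb]
    congr 1
    symm
    apply List.filter_eq_self.mpr
    intro i hi
    rw [fibTail]
    simp [if_neg hb]

-- ===== VERDICT (by name: the statement is the Claim_ definition above) =====
theorem nonfibonacci_spec : Claim_equal_nonfibonacci := by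
  intro n _
  unfold Spec_nonfibonacci nonfibonacci nonfibonacci_alt
  rw [gapLoopB_eq_filter n 1 2 [] ⟨by omega, by omega⟩ ⟨by omega, by omega, by omega⟩]
  rw [PySem.List.foldl_append_if_eq_filter]
  simp only [List.nil_append]
  have hcont : ∀ i : Int, PySem.Set.contains (fibLoopA n 0 1 PySem.Set.empty ⟨by omega, by omega, by omega⟩) i
      = decide (i ∈ fibLoopA n 0 1 PySem.Set.empty ⟨by omega, by omega, by omega⟩) := fun i => by simp
  simp only [hcont]
  by_cases hn : n ≤ 0
  · rw [PySem.List.pyRange_one_eq_nil (by omega), PySem.List.pyRange_one_eq_nil (by omega)]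
    simp
  · rw [PySem.List.pyRange_one_cons (by omega), List.filter_cons]
    have h1 : (!decide ((1 : Int) ∈ fibLoopA n 0 1 PySem.Set.empty ⟨by omega, by omega, by omega⟩)) = false := by
      have hm : (1 : Int) ∈ fibLoopA n 0 1 PySem.Set.empty ⟨by omega, by omega, by omega⟩ := by
        rw [mem_fibLoopA]
        right
        rw [fibTail, if_pos (show (0:Int) ≤ n by omega),
            fibTail, if_pos (show (1:Int) ≤ n by omega)]
        simp
      simp only [Bool.not_eq_eq_eq_not, Bool.not_false, decide_eq_true_eq]
      exact hm
    rw [h1]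
    apply List.filter_congr
    intro i hi
    rw [PySem.List.mem_pyRange_one] at hi
    congr 1
    apply decide_eq_decide.mpr
    rw [mem_fibLoopA]
    simp only [PySem.Set.empty, List.not_mem_nil, false_or]
    conv_lhs => rw [fibTail, fibTail, fibTail]
    rw [if_pos (show (0:Int) ≤ n by omega), if_pos (show (1:Int) ≤ n by omega),
        if_pos (show (0:Int) + 1 ≤ n by omega)]
    simp only [List.mem_cons]
    constructor
    · rintro (rfl | rfl | rfl | hm)
      · omega
      · omega
      · omega
      · exact hm
    · exact fun hm => Or.inr (Or.inr (Or.inr hm))
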